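-- pv_equiv track=rewrite | github.com/vishalpmittal/practice-fun | funNLearn/src/main/java/dsAlgo/math/ShuffledInteger.py | solution
-- ===== SOURCE A (Python) =====
-- def solution(A):
--     if not A or A < 10:
--         return A
--
--     A1 = A
--     A2 = 0
--     num_of_digits = 0
--     while A > 0:
--         A2 = A2 * 10 + A % 10
--         A = A // 10
--         num_of_digits += 1
--
--     O = 0
--     for _ in range(num_of_digits // 2):
--         O = O * 10 + A2 % 10
--         A2 = A2 // 10
--         O = O * 10 + A1 % 10
--         A1 = A1 // 10
--
--     if num_of_digits % 2 == 1:
--         O = O * 10 + A2 % 10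
--
--     return O
-- ===== SOURCE B (Python) =====
-- def solution(A):
--     if not A or A < 10:
--         return A
--     d = [ord(c) - 48 for c in str(A)]
--     O = 0
--     while len(d) > 1:
--         O = O * 100 + d[0] * 10 + d[-1]
--         d = d[1:-1]
--     if d:
--         O = O * 10 + d[0]
--     return O
-- ===== Notes on version B (the rewrite author's own statement) =====
-- stated objective: simpler
-- what changed: Replaces A's arithmetic digit-reversal pass plus counted interleave loop over three mutating integers with a direct outside-in peel of the digit list of str(A), consuming the first and last digit each step.
import Mathlib
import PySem

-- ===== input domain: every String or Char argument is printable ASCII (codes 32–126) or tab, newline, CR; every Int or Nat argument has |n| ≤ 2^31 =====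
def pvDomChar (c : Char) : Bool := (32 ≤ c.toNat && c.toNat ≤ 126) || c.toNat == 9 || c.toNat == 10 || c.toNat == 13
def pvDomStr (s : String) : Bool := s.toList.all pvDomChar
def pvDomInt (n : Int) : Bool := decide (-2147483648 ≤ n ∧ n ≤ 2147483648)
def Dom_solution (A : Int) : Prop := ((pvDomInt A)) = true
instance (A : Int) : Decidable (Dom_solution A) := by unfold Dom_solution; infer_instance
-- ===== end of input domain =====

-- B replaces A's arithmetic digit-reversal pass and counted three-register interleave loop with a
-- direct outside-in peel of the digit list of str(A) (simpler, same exact result).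

-- ===== PORT A =====
-- while A > 0: A2 = A2*10 + A%10; A = A//10; num_of_digits += 1
def solRevLoop (A A2 nd : Int) : Int × Int :=
  if h : 0 < A then
    solRevLoop (PySem.Int.floordiv A 10) (A2 * 10 + PySem.Int.mod A 10) (nd + 1)
  else (A2, nd)
termination_by A.toNat
decreasing_by
  have h10 : PySem.Int.floordiv A 10 = A / 10 := PySem.Int.floordiv_eq_ediv_of_pos (by norm_num)
  rw [h10]
  omega

-- one body of `for _ in range(num_of_digits // 2)` on the state (O, A2, A1)
def solStep (s : Int × Int × Int) : Int × Int × Int :=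
  ((s.1 * 10 + PySem.Int.mod s.2.1 10) * 10 + PySem.Int.mod s.2.2 10,
   PySem.Int.floordiv s.2.1 10,
   PySem.Int.floordiv s.2.2 10)

def solution (A : Int) : Int :=
  if A = 0 ∨ A < 10 then A
  else
    let p := solRevLoop A 0 0
    let A2 := p.1
    let nd := p.2
    let s := (PySem.List.pyRange 0 (PySem.Int.floordiv nd 2) 1).foldl
               (fun s _ => solStep s) ((0 : Int), A2, A)
    if PySem.Int.mod nd 2 = 1 then s.1 * 10 + PySem.Int.mod s.2.1 10 else s.1

-- ===== PORT B =====
-- while len(d) > 1: O = O*100 + d[0]*10 + d[-1]; d = d[1:-1]; then `if d: O = O*10 + d[0]`.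
-- (for d = x :: y :: rest, d[-1] is (y :: rest).getLast and d[1:-1] is (y :: rest).dropLast)
def solAltLoop (O : Int) (d : List Int) : Int :=
  match d with
  | x :: y :: rest =>
      solAltLoop (O * 100 + x * 10 + (y :: rest).getLast (by simp)) ((y :: rest).dropLast)
  | [d0] => O * 10 + d0
  | [] => O
termination_by d.length
decreasing_by simp

-- d = [ord(c) - 48 for c in str(A)]
def solution_alt (A : Int) : Int :=
  if A = 0 ∨ A < 10 then A
  else
    solAltLoop 0 ((PySem.Int.toChars A).map (fun c => (c.toNat : Int) - 48))

-- ===== PRECONDITION & SPEC =====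
def Spec_solution (A : Int) (out : Int) : Prop := out = solution_alt A
instance (A : Int) (out : Int) : Decidable (Spec_solution A out) := by unfold Spec_solution; infer_instance

-- ===== CLAIM (what is proved, stated in full; the proofs are below) =====
def Claim_equal_solution : Prop := ∀ (A : Int), Dom_solution A → Spec_solution A (solution A)

-- ===== LEMMAS AND PROOFS =====

-- the reversal loop computes the digit-reversal of m and its digit count
lemma solRevLoop_eq (m : Nat) : ∀ acc nd : Int,
    solRevLoop (m : Int) acc nd =
      (acc * 10 ^ (Nat.digits 10 m).length +
         (((Nat.ofDigits 10 ((Nat.digits 10 m).reverse) : Nat)) : Int),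
       nd + (Nat.digits 10 m).length) := by
  induction m using Nat.strong_induction_on with
  | _ m ih =>
    intro acc nd
    rcases Nat.eq_zero_or_pos m with hm | hm
    · subst hm
      rw [solRevLoop]
      simp [Nat.ofDigits_nil]
    · have hlt : m / 10 < m := Nat.div_lt_self hm (by norm_num)
      have hdig := Nat.digits_def' (b := 10) (by norm_num) hm
      rw [solRevLoop]
      have hpos : (0 : Int) < (m : Int) := by exact_mod_cast hm
      rw [dif_pos hpos]
      have h1 : PySem.Int.floordiv (m : Int) 10 = ((m / 10 : Nat) : Int) := by
        exact_mod_cast PySem.Int.floordiv_natCast m 10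
      have h2 : PySem.Int.mod (m : Int) 10 = ((m % 10 : Nat) : Int) := by
        exact_mod_cast PySem.Int.mod_natCast m 10
      rw [h1, h2, ih _ hlt]
      rw [hdig]
      simp only [List.reverse_cons, List.length_cons, Prod.mk.injEq]
      refine ⟨?_, by push_cast; ring⟩
      rw [Nat.ofDigits_append, Nat.ofDigits_cons, Nat.ofDigits_nil]
      simp only [List.length_reverse]
      push_cast
      ring

-- a fold that ignores the list elements is an iterate
lemma foldl_const_iterate {α β : Type} (g : β → β) :
    ∀ (l : List α) (s : β), l.foldl (fun s _ => g s) s = g^[l.length] s := by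
  intro l
  induction l with
  | nil => intro s; rfl
  | cons x t ih =>
      intro s
      simp only [List.foldl_cons, List.length_cons, Function.iterate_succ_apply]
      exact ih (g s)

lemma pymod10 (d t : Nat) (hd : d < 10) :
    PySem.Int.mod ((d + 10 * t : Nat) : Int) 10 = (d : Int) := by
  have h := PySem.Int.mod_natCast (d + 10 * t) 10
  have : (d + 10 * t) % 10 = d := by omega
  rw [show ((10 : Int)) = ((10 : Nat) : Int) by norm_num, h, this]

lemma pydiv10 (d t : Nat) (hd : d < 10) :
    PySem.Int.floordiv ((d + 10 * t : Nat) : Int) 10 = (t : Int) := by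
  have h := PySem.Int.floordiv_natCast (d + 10 * t) 10
  have : (d + 10 * t) / 10 = t := by omega
  rw [show ((10 : Int)) = ((10 : Nat) : Int) by norm_num, h, this]

lemma altLoop_cons (O x : Int) (t : List Int) (h : t ≠ []) :
    solAltLoop O (x :: t) = solAltLoop (O * 100 + x * 10 + t.getLast h) t.dropLast := by
  cases t with
  | nil => exact absurd rfl h
  | cons y rest => rw [solAltLoop]

lemma altLoop_append (O x z : Int) (t : List Int) :
    solAltLoop O (x :: (t ++ [z])) = solAltLoop (O * 100 + x * 10 + z) t := by
  rw [altLoop_cons O x (t ++ [z]) (by simp)]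
  have h1 : (t ++ [z]).getLast (by simp) = z := by
    simp [List.getLast_append]
  have h2 : (t ++ [z]).dropLast = t := by simp
  rw [h2]
  congr 1
  rw [h1]

-- main invariant: A's interleave loop on the numbers equals B's outside-in peel on the digit list.
-- M is the not-yet-consumed middle segment (most-significant first); S, T are already-consumed
-- digits still sitting inside A2 resp. A1.
lemma interleave_main : ∀ (n : Nat) (M : List Nat), M.length = n → ∀ (S T : List Nat) (O : Int),
    (∀ d ∈ M, d < 10) →
    ((fun s => if M.length % 2 = 1 then s.1 * 10 + PySem.Int.mod s.2.1 10 else s.1)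
       (solStep^[M.length / 2]
         (O, (((Nat.ofDigits 10 (M ++ S) : Nat)) : Int), (((Nat.ofDigits 10 (M.reverse ++ T) : Nat)) : Int))))
      = solAltLoop O (M.map (fun d : Nat => (d : Int))) := by
  intro n
  induction n using Nat.strong_induction_on with
  | _ n ih =>
    intro M hlen S T O hM
    match M with
    | [] => simp [solAltLoop]
    | [x] =>
        have hx : x < 10 := hM x (by simp)
        simp only [List.length_singleton, List.cons_append, List.nil_append]
        rw [if_pos (by norm_num), show (1 : Nat) / 2 = 0 from rfl, Function.iterate_zero, id_eq]
        rw [show (Nat.ofDigits 10 (x :: S) : Nat) = x + 10 * (Nat.ofDigits 10 S : Nat) from Nat.ofDigits_cons]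
        rw [pymod10 _ _ hx]
        simp [solAltLoop]
    | x :: y :: rest =>
        -- decompose the tail as mid ++ [last]
        have hne : (y :: rest) ≠ [] := by simp
        set z := (y :: rest).getLast hne with hz
        set mid := (y :: rest).dropLast with hmid
        have hsplit : y :: rest = mid ++ [z] := (List.dropLast_append_getLast hne).symm
        have hx : x < 10 := hM x (by simp)
        have hzlt : z < 10 := hM z (by rw [hz]; exact List.mem_cons_of_mem _ (List.getLast_mem hne))
        have hmidlt : ∀ d ∈ mid, d < 10 := by
          intro d hd
          exact hM d (by rw [show (x :: y :: rest) = x :: (mid ++ [z]) from by rw [← hsplit]]; simp [hd])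
        have hlen2 : (x :: y :: rest).length = mid.length + 2 := by
          rw [show (x :: y :: rest) = x :: (mid ++ [z]) from by rw [← hsplit]]
          simp
        -- one step of A's loop
        have hstep : solStep (O, (((Nat.ofDigits 10 ((x :: y :: rest) ++ S) : Nat)) : Int),
              (((Nat.ofDigits 10 ((x :: y :: rest).reverse ++ T) : Nat)) : Int))
            = ((O * 10 + (x : Int)) * 10 + (z : Int),
               (((Nat.ofDigits 10 (mid ++ (z :: S)) : Nat)) : Int),
               (((Nat.ofDigits 10 (mid.reverse ++ (x :: T)) : Nat)) : Int)) := by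
          have hA2 : ((x :: y :: rest) ++ S) = x :: (mid ++ (z :: S)) := by
            rw [show (x :: y :: rest) = x :: (mid ++ [z]) from by rw [← hsplit]]
            simp
          have hA1 : ((x :: y :: rest).reverse ++ T) = z :: (mid.reverse ++ (x :: T)) := by
            rw [show (x :: y :: rest) = x :: (mid ++ [z]) from by rw [← hsplit]]
            simp
          rw [hA2, hA1]
          rw [show (Nat.ofDigits 10 (x :: (mid ++ z :: S)) : Nat) = x + 10 * (Nat.ofDigits 10 (mid ++ z :: S) : Nat) from Nat.ofDigits_cons]
          rw [show (Nat.ofDigits 10 (z :: (mid.reverse ++ x :: T)) : Nat) = z + 10 * (Nat.ofDigits 10 (mid.reverse ++ x :: T) : Nat) from Nat.ofDigits_cons]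
          simp only [solStep]
          rw [pymod10 _ _ hx, pymod10 _ _ hzlt, pydiv10 _ _ hx, pydiv10 _ _ hzlt]
        have hiter : (x :: y :: rest).length / 2 = mid.length / 2 + 1 := by omega
        have hpar : (x :: y :: rest).length % 2 = mid.length % 2 := by omega
        rw [hiter, hpar, Function.iterate_succ_apply, hstep]
        have := ih mid.length (by omega) mid rfl (z :: S) (x :: T)
          ((O * 10 + (x : Int)) * 10 + (z : Int)) hmidlt
        simp only at this ⊢
        rw [this]
        -- B side: one peel
        have hmapped : ((x :: y :: rest).map (fun d : Nat => (d : Int)))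
            = (x : Int) :: ((mid.map (fun d : Nat => (d : Int))) ++ [(z : Int)]) := by
          rw [show (x :: y :: rest) = x :: (mid ++ [z]) from by rw [← hsplit]]
          simp
        rw [hmapped, altLoop_append]
        rw [show O * 100 + (x : Int) * 10 + (z : Int) = (O * 10 + (x : Int)) * 10 + (z : Int) from by ring]

-- str(m) is the reversed digit list rendered with digitChar
lemma toDigits_eq_digits (m : Nat) (hm : 0 < m) :
    Nat.toDigits 10 m = ((Nat.digits 10 m).reverse).map Nat.digitChar := by
  induction m using Nat.strong_induction_on with
  | _ m ih =>
    rcases Nat.lt_or_ge m 10 with h | h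
    · rw [Nat.toDigits_of_lt_base h, Nat.digits_def' (by norm_num : (1:Nat) < 10) hm]
      rw [Nat.div_eq_of_lt h]
      simp [Nat.mod_eq_of_lt h]
    · have hq : 0 < m / 10 := Nat.div_pos h (by norm_num)
      rw [Nat.toDigits_of_base_le (by norm_num) h,
        ih (m / 10) (Nat.div_lt_self hm (by norm_num)) hq,
        Nat.digits_def' (by norm_num : (1:Nat) < 10) hm]
      simp

lemma digitChar_ord (d : Nat) (hd : d < 10) :
    ((Nat.digitChar d).toNat : Int) - 48 = (d : Int) := by
  interval_cases d <;> decide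

-- ===== VERDICT (by name: the statement is the Claim_ definition above) =====
theorem solution_spec : Claim_equal_solution := by
  intro A _
  unfold Spec_solution solution solution_alt
  by_cases hA : A = 0 ∨ A < 10
  · rw [if_pos hA, if_pos hA]
  · rw [if_neg hA, if_neg hA]
    have hA10 : (10 : Int) ≤ A := by omega
    obtain ⟨m, rfl⟩ : ∃ m : Nat, A = (m : Int) := ⟨A.toNat, by omega⟩
    have hm : 10 ≤ m := by exact_mod_cast hA10
    have hmpos : 0 < m := by omega
    set L : List Nat := (Nat.digits 10 m).reverse with hL
    have hLlt : ∀ d ∈ L, d < 10 := by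
      intro d hd
      exact Nat.digits_lt_base (by norm_num) (List.mem_reverse.mp hd)
    -- A side
    rw [solRevLoop_eq m 0 0]
    simp only [zero_mul, zero_add, Int.zero_add]
    have hk2 : PySem.Int.floordiv ((L.length : Nat) : Int) 2 = (((L.length / 2 : Nat)) : Int) := by
      simpa using PySem.Int.floordiv_natCast L.length 2
    have hlenL : (Nat.digits 10 m).length = L.length := by simp [hL]
    rw [hlenL, hk2, foldl_const_iterate]
    rw [PySem.List.length_pyRange_one]
    have hcount : ((((L.length / 2 : Nat)) : Int) - 0).toNat = L.length / 2 := by omega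
    rw [hcount]
    have hmod2 : PySem.Int.mod ((L.length : Nat) : Int) 2 = (((L.length % 2 : Nat)) : Int) := by
      simpa using PySem.Int.mod_natCast L.length 2
    rw [hmod2]
    have hparity : ((((L.length % 2 : Nat)) : Int) = 1) ↔ (L.length % 2 = 1) := by
      constructor <;> intro h <;> exact_mod_cast h
    -- B side digit list
    have hchars : (PySem.Int.toChars (m : Int)).map (fun c => (c.toNat : Int) - 48)
        = L.map (fun d : Nat => (d : Int)) := by
      have hnn : ¬ ((m : Int) < 0) := by omega
      rw [PySem.Int.toChars, if_neg hnn, Int.toNat_natCast, toDigits_eq_digits m hmpos]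
      rw [List.map_map]
      apply List.map_congr_left
      intro d hd
      exact digitChar_ord d (hLlt d hd)
    rw [hchars]
    -- connect via the main invariant with S = T = []
    have hmain := interleave_main L.length L rfl [] [] 0 hLlt
    simp only at hmain
    have hA1 : (Nat.ofDigits 10 (L.reverse ++ []) : Nat) = m := by
      simp [hL, Nat.ofDigits_digits]
    have hA2 : (Nat.ofDigits 10 (L ++ []) : Nat) = (Nat.ofDigits 10 L : Nat) := by simp
    rw [hA1, hA2] at hmain
    rw [← hmain]
    split_ifs with h1 h2 h2
    · rfl
    · exact absurd (hparity.mp h1) h2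
    · exact absurd (hparity.mpr h2) h1
    · rfl
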